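-- pv_equiv track=rewrite | github.com/norrye/data-comparison | scripts/inspect_columns.py | semantic_field_analyzer
-- ===== SOURCE A (Python) =====
-- from typing import Dict, List, Tuple
--
-- def semantic_field_analyzer(dd_columns: List[str], ac_columns: List[str]) -> Dict[str, str]:
--     """Analyze semantic field mappings between datasets."""
--
--     # Define semantic patterns for field matching
--     semantic_patterns = {
--         # Personal information
--         'title': ['title', 'salutation', 'prefix'],
--         'first_name': ['firstname', 'first_name', 'given_name', 'fname', 'forename'],
--         'surname': ['surname', 'lastname', 'last_name', 'family_name', 'lname'],
--         'gender': ['gender', 'sex'],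
--
--         # Contact information
--         'email': ['email', 'email_address', 'emailstd', 'e_mail'],
--         'mobile': ['mobile', 'cell', 'cellular', 'mobile_phone', 'cell_phone'],
--         'landline': ['landline', 'phone', 'telephone', 'home_phone', 'land_line'],
--
--         # Address information
--         'suburb': ['suburb', 'city', 'locality', 'town'],
--         'state': ['state', 'province', 'region'],
--         'postcode': ['postcode', 'zip', 'postal_code', 'zipcode']
--     }
--
--     # Manual overrides for specific field mappings
--     manual_overrides = {
--         'mobile_text': 'Mobile',
--         'landline_text': 'Landline',
--         'email_sha256': 'EmailHash'
--     }
--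
--     mappings = {}
--
--     # Apply manual overrides first
--     for ac_field, dd_field in manual_overrides.items():
--         if ac_field in [col.lower() for col in ac_columns] and dd_field in dd_columns:
--             mappings[dd_field] = ac_field
--
--     # Semantic matching for remaining fields
--     for dd_col in dd_columns:
--         if dd_col in mappings:  # Skip if already mapped by override
--             continue
--
--         dd_lower = dd_col.lower()
--         best_match = None
--
--         # Direct name matching first
--         for ac_col in ac_columns:
--             if dd_lower == ac_col.lower():
--                 best_match = ac_col
--                 break
--
--         # Semantic pattern matching
--         if not best_match:
--             for semantic_type, patterns in semantic_patterns.items():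
--                 if any(pattern in dd_lower for pattern in patterns):
--                     for ac_col in ac_columns:
--                         ac_lower = ac_col.lower()
--                         if any(pattern in ac_lower for pattern in patterns):
--                             best_match = ac_col
--                             break
--                     if best_match:
--                         break
--
--         if best_match:
--             mappings[dd_col] = best_match
--
--     return mappings
-- ===== SOURCE B (Python) =====
-- from typing import Dict, List
--
-- def semantic_field_analyzer(dd_columns: List[str], ac_columns: List[str]) -> Dict[str, str]:
--     """Analyze semantic field mappings between datasets (index-based rewrite)."""
--
--     semantic_patterns = {
--         'title': ['title', 'salutation', 'prefix'],
--         'first_name': ['firstname', 'first_name', 'given_name', 'fname', 'forename'],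
--         'surname': ['surname', 'lastname', 'last_name', 'family_name', 'lname'],
--         'gender': ['gender', 'sex'],
--         'email': ['email', 'email_address', 'emailstd', 'e_mail'],
--         'mobile': ['mobile', 'cell', 'cellular', 'mobile_phone', 'cell_phone'],
--         'landline': ['landline', 'phone', 'telephone', 'home_phone', 'land_line'],
--         'suburb': ['suburb', 'city', 'locality', 'town'],
--         'state': ['state', 'province', 'region'],
--         'postcode': ['postcode', 'zip', 'postal_code', 'zipcode'],
--     }
--
--     manual_overrides = {
--         'mobile_text': 'Mobile',
--         'landline_text': 'Landline',
--         'email_sha256': 'EmailHash',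
--     }
--
--     # Precompute once over ac_columns: lowered names, a first-match index by
--     # lowercase name, and the first ac column matching each semantic type.
--     ac_lowered = [(col, col.lower()) for col in ac_columns]
--     ac_lower_set = {low for _, low in ac_lowered}
--
--     direct = {}
--     for col, low in ac_lowered:
--         direct.setdefault(low, col)
--
--     sem_first = {}
--     for semantic_type, patterns in semantic_patterns.items():
--         for col, low in ac_lowered:
--             if any(pattern in low for pattern in patterns):
--                 sem_first[semantic_type] = col
--                 break
--
--     dd_set = set(dd_columns)
--     mappings = {}
--
--     for ac_field, dd_field in manual_overrides.items():
--         if ac_field in ac_lower_set and dd_field in dd_set: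
--             mappings[dd_field] = ac_field
--
--     for dd_col in dd_columns:
--         if dd_col in mappings:
--             continue
--         dd_lower = dd_col.lower()
--         best = direct.get(dd_lower)
--         if not best:
--             for semantic_type, patterns in semantic_patterns.items():
--                 if semantic_type in sem_first and any(p in dd_lower for p in patterns):
--                     best = sem_first[semantic_type]
--                     break
--         if best:
--             mappings[dd_col] = best
--
--     return mappings
-- ===== Notes on version B (the rewrite author's own statement) =====
-- stated objective: faster
-- what changed: Instead of rescanning ac_columns (and re-lowercasing it) for every dd column, B precomputes once a lowercase->first-column dict and a per-semantic-type first-matching-ac-column index, so each dd column is resolved by dictionary lookups.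
import Mathlib
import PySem

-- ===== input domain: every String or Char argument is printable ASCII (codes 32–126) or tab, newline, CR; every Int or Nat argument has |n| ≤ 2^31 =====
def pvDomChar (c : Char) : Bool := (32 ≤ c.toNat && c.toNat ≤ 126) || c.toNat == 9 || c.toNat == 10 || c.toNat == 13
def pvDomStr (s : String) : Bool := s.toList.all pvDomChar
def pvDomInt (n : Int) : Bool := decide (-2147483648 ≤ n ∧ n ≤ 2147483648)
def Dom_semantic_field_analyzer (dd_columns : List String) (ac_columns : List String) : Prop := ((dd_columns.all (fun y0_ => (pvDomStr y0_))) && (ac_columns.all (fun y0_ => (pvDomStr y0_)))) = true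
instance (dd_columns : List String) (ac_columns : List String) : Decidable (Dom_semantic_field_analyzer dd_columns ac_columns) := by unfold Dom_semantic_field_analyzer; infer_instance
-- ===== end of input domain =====

-- B replaces A's per-dd-column rescans of ac_columns by two indexes built once
-- (lowercase-name -> first ac column, semantic type -> first matching ac column); objective: faster.

-- shared literal tables (data of both Pythons)
def pvSemanticPatterns : List (String × List String) := [
  ("title", ["title", "salutation", "prefix"]),
  ("first_name", ["firstname", "first_name", "given_name", "fname", "forename"]),
  ("surname", ["surname", "lastname", "last_name", "family_name", "lname"]),
  ("gender", ["gender", "sex"]),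
  ("email", ["email", "email_address", "emailstd", "e_mail"]),
  ("mobile", ["mobile", "cell", "cellular", "mobile_phone", "cell_phone"]),
  ("landline", ["landline", "phone", "telephone", "home_phone", "land_line"]),
  ("suburb", ["suburb", "city", "locality", "town"]),
  ("state", ["state", "province", "region"]),
  ("postcode", ["postcode", "zip", "postal_code", "zipcode"])]

def pvManualOverrides : List (String × String) :=
  [("mobile_text", "Mobile"), ("landline_text", "Landline"), ("email_sha256", "EmailHash")]

-- any(pattern in s for pattern in ps)
def pvAnyIn (ps : List String) (s : String) : Bool := ps.any (fun p => PySem.Str.isIn p s)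

-- Python truthiness of an Optional[str]
def pvTruthy : Option String → Bool
  | none => false
  | some c => c != ""

-- ===== PORT A =====
-- A's 'for semantic_type, patterns in semantic_patterns.items(): …' loop, threading best_match
def aSemanticLoop (ddl : String) (ac : List String) :
    Option String → List (String × List String) → Option String
  | best, [] => best
  | best, (_, ps) :: rest =>
    if pvAnyIn ps ddl then
      let best' := match ac.find? (fun c => pvAnyIn ps (PySem.Str.lower c)) with
        | some c => some c
        | none => best
      if pvTruthy best' then best' else aSemanticLoop ddl ac best' rest
    else aSemanticLoop ddl ac best rest

-- A's manual-override loop (the lowered list is recomputed in the loop, as in A)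
def aOverrides (dd_columns : List String) (ac_columns : List String) : PySem.Dict String String :=
  pvManualOverrides.foldl (fun m p =>
    if (ac_columns.map PySem.Str.lower).contains p.1 && dd_columns.contains p.2 then
      m.insert p.2 p.1 else m) PySem.Dict.empty

-- A's body of 'for dd_col in dd_columns: …'
def aStep (ac_columns : List String) (m : PySem.Dict String String) (dd_col : String) :
    PySem.Dict String String :=
  if m.contains dd_col then m
  else
    let ddl := PySem.Str.lower dd_col
    let best := ac_columns.find? (fun c => ddl == PySem.Str.lower c)
    let best := if pvTruthy best then best else aSemanticLoop ddl ac_columns best pvSemanticPatterns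
    if pvTruthy best then m.insert dd_col (best.getD "") else m

def semantic_field_analyzer (dd_columns : List String) (ac_columns : List String) : List (String × String) :=
  (dd_columns.foldl (aStep ac_columns) (aOverrides dd_columns ac_columns)).items

-- ===== PORT B =====
-- direct = {}; for col, low in ac_lowered: direct.setdefault(low, col)
def bDirectIndex (acLow : List (String × String)) : PySem.Dict String String :=
  acLow.foldl (fun d p => d.setdefault p.2 p.1) PySem.Dict.empty

-- sem_first: first ac column matching each semantic type (inner for-break = find?)
def bSemIndex (acLow : List (String × String)) : PySem.Dict String String :=
  pvSemanticPatterns.foldl (fun d sp =>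
    match acLow.find? (fun q => pvAnyIn sp.2 q.2) with
    | some q => d.insert sp.1 q.1
    | none => d) PySem.Dict.empty

-- B's 'for semantic_type, patterns …: if semantic_type in sem_first and any(…): best = sem_first[…]; break'
def bSemLookup (semFirst : PySem.Dict String String) (ddl : String) :
    List (String × List String) → Option String
  | [] => none
  | (st, ps) :: rest =>
    if semFirst.contains st && pvAnyIn ps ddl then semFirst.get? st
    else bSemLookup semFirst ddl rest

-- B's override loop, with the two membership sets
def bOverrides (dd_columns : List String) (acLow : List (String × String)) : PySem.Dict String String :=
  pvManualOverrides.foldl (fun m p =>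
    if PySem.Set.contains (PySem.Set.ofList (acLow.map (·.2))) p.1
        && PySem.Set.contains (PySem.Set.ofList dd_columns) p.2 then
      m.insert p.2 p.1 else m) PySem.Dict.empty

-- B's body of 'for dd_col in dd_columns: …' — only dictionary lookups
def bStep (direct semFirst : PySem.Dict String String) (m : PySem.Dict String String)
    (dd_col : String) : PySem.Dict String String :=
  if m.contains dd_col then m
  else
    let ddl := PySem.Str.lower dd_col
    let best := direct.get? ddl
    let best := if pvTruthy best then best else
      match bSemLookup semFirst ddl pvSemanticPatterns with
      | some c => some c
      | none => best
    if pvTruthy best then m.insert dd_col (best.getD "") else m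

def semantic_field_analyzer_alt (dd_columns : List String) (ac_columns : List String) : List (String × String) :=
  let acLow := ac_columns.map (fun c => (c, PySem.Str.lower c))
  (dd_columns.foldl (bStep (bDirectIndex acLow) (bSemIndex acLow)) (bOverrides dd_columns acLow)).items

-- ===== PRECONDITION & SPEC =====
def Spec_semantic_field_analyzer (dd_columns : List String) (ac_columns : List String) (out : List (String × String)) : Prop := out = semantic_field_analyzer_alt dd_columns ac_columns
instance (dd_columns : List String) (ac_columns : List String) (out : List (String × String)) : Decidable (Spec_semantic_field_analyzer dd_columns ac_columns out) := by unfold Spec_semantic_field_analyzer; infer_instance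

-- ===== CLAIM (what is proved, stated in full; the proofs are below) =====
def Claim_equal_semantic_field_analyzer : Prop := ∀ (dd_columns : List String) (ac_columns : List String), Dom_semantic_field_analyzer dd_columns ac_columns → Spec_semantic_field_analyzer dd_columns ac_columns (semantic_field_analyzer dd_columns ac_columns)

-- ===== LEMMAS AND PROOFS =====

theorem set_contains_ofList (l : List String) (x : String) :
    PySem.Set.contains (PySem.Set.ofList l) x = l.contains x := by
  by_cases h : x ∈ l <;> simp [PySem.Set.mem_ofList, h]

theorem isIn_empty_eq_false (p : String) (h : p ≠ "") : PySem.Str.isIn p "" = false := by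
  rw [Bool.eq_false_iff]
  intro hc
  rw [PySem.Str.isIn_iff_infix] at hc
  simp [List.infix_nil] at hc
  exact h (by simpa using hc)

theorem anyIn_lower_empty (ps : List String) (h : "" ∉ ps) :
    pvAnyIn ps (PySem.Str.lower "") = false := by
  have hl : PySem.Str.lower "" = "" := by decide
  rw [hl, pvAnyIn, List.any_eq_false]
  intro p hp
  rw [Bool.not_eq_true]
  exact isIn_empty_eq_false p (fun he => h (he ▸ hp))

-- the direct index is a first-match scan
theorem direct_fold_get (ps : List (String × String)) :
    ∀ (d : PySem.Dict String String) (l : String),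
      (ps.foldl (fun d p => d.setdefault p.2 p.1) d).get? l
        = (d.get? l).or ((ps.find? (fun p => p.2 == l)).map (·.1)) := by
  induction ps with
  | nil => simp
  | cons p ps ih =>
    intro d l
    rw [List.foldl_cons, ih]
    by_cases h : p.2 = l
    · subst h
      rw [PySem.Dict.get?_setdefault_self]
      cases hd : d.get? p.2 <;> simp [hd]
    · rw [PySem.Dict.get?_setdefault_of_ne d p.1 (Ne.symm h)]
      simp [List.find?_cons, beq_iff_eq, h]

-- keys not inserted stay untouched by the sem_first build
theorem semIndex_frozen (acLow : List (String × String)) :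
    ∀ (pats : List (String × List String)) (d : PySem.Dict String String) (st : String),
      st ∉ pats.map (·.1) →
      (pats.foldl (fun d sp =>
          match acLow.find? (fun q => pvAnyIn sp.2 q.2) with
          | some q => d.insert sp.1 q.1
          | none => d) d).get? st = d.get? st := by
  intro pats
  induction pats with
  | nil => intro d st _; rfl
  | cons sp rest ih =>
    intro d st hst
    rw [List.map_cons, List.mem_cons] at hst
    push_neg at hst
    rw [List.foldl_cons, ih _ _ hst.2]
    cases hf : acLow.find? (fun q => pvAnyIn sp.2 q.2) with
    | none => rfl
    | some q => exact PySem.Dict.get?_insert_of_ne d q.1 hst.1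

-- sem_first[st] is the first ac column matching st's patterns
theorem semIndex_get (acLow : List (String × String)) :
    ∀ (pats : List (String × List String)), (pats.map (·.1)).Nodup →
      ∀ (d : PySem.Dict String String), (∀ k ∈ pats.map (·.1), d.get? k = none) →
      ∀ st ps, (st, ps) ∈ pats →
      (pats.foldl (fun d sp =>
          match acLow.find? (fun q => pvAnyIn sp.2 q.2) with
          | some q => d.insert sp.1 q.1
          | none => d) d).get? st
        = (acLow.find? (fun q => pvAnyIn ps q.2)).map (·.1) := by
  intro pats
  induction pats with
  | nil => intro _ _ _ st ps h; simp at h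
  | cons sp rest ih =>
    intro hnd d hemp st ps hmem
    rw [List.map_cons, List.nodup_cons] at hnd
    rw [List.foldl_cons]
    rcases List.mem_cons.mp hmem with heq | hmem'
    · have hst : st = sp.1 := by rw [← heq]
      have hps : ps = sp.2 := by rw [← heq]
      subst hst; subst hps
      rw [semIndex_frozen acLow rest _ _ hnd.1]
      cases hf : acLow.find? (fun q => pvAnyIn sp.2 q.2) with
      | none => simpa using hemp sp.1 (by simp)
      | some q => simp [PySem.Dict.get?_insert_self]
    · refine ih hnd.2 _ ?_ st ps hmem'
      intro k hk
      have hkne : k ≠ sp.1 := fun he => hnd.1 (he ▸ hk)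
      cases hf : acLow.find? (fun q => pvAnyIn sp.2 q.2) with
      | none => exact hemp k (by simp [hk])
      | some q => rw [PySem.Dict.get?_insert_of_ne d q.1 hkne]; exact hemp k (by simp [hk])

-- A's inline semantic scan equals B's indexed lookup
theorem semLoop_eq (ac : List String) (semFirst : PySem.Dict String String) (ddl : String) :
    ∀ (pats : List (String × List String)) (best : Option String),
      (∀ sp ∈ pats, semFirst.get? sp.1
        = ((ac.map (fun c => (c, PySem.Str.lower c))).find? (fun q => pvAnyIn sp.2 q.2)).map (·.1)) →
      (∀ sp ∈ pats, "" ∉ sp.2) →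
      pvTruthy best = false →
      aSemanticLoop ddl ac best pats
        = (match bSemLookup semFirst ddl pats with
           | some c => some c
           | none => best) := by
  intro pats
  induction pats with
  | nil => intro best _ _ _; rfl
  | cons sp rest ih =>
    intro best hget hne hbest
    obtain ⟨st, ps⟩ := sp
    have hg := hget (st, ps) (by simp)
    rw [List.find?_map] at hg
    dsimp only at hg
    have hg' : semFirst.get? st = ac.find? (fun c => pvAnyIn ps (PySem.Str.lower c)) := by
      rw [hg, Option.map_map]
      have h1 : ((fun q : String × String => pvAnyIn ps q.2) ∘ fun c => (c, PySem.Str.lower c))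
          = (fun c => pvAnyIn ps (PySem.Str.lower c)) := rfl
      have h2 : ((fun x : String × String => x.1) ∘ fun c => (c, PySem.Str.lower c))
          = (fun c : String => c) := rfl
      rw [h1, h2]
      cases ac.find? (fun c => pvAnyIn ps (PySem.Str.lower c)) <;> rfl
    rw [aSemanticLoop, bSemLookup]
    by_cases ha : pvAnyIn ps ddl
    · cases hf : ac.find? (fun c => pvAnyIn ps (PySem.Str.lower c)) with
      | some c =>
        have hpc : pvAnyIn ps (PySem.Str.lower c) = true := by
          have := List.find?_some hf; simpa using this
        have hc : c ≠ "" := by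
          intro he
          rw [he, anyIn_lower_empty ps (hne (st, ps) (by simp))] at hpc
          exact Bool.false_ne_true hpc
        have hcont : semFirst.contains st = true := by
          rw [PySem.Dict.contains_eq_isSome_get?, hg', hf]; rfl
        simp only [ha, hcont, hf, hg', if_true, Bool.true_and]
        have : pvTruthy (some c) = true := by simp [pvTruthy, hc]
        simp [this]
      | none =>
        have hcont : semFirst.contains st = false := by
          rw [PySem.Dict.contains_eq_isSome_get?, hg', hf]; rfl
        simp only [ha, hcont, hf, if_true, Bool.false_and, if_false]
        simp only [hbest, if_false]
        exact ih best (fun q hq => hget q (by simp [hq])) (fun q hq => hne q (by simp [hq])) hbest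
    · simp only [ha, if_false, Bool.and_false]
      exact ih best (fun q hq => hget q (by simp [hq])) (fun q hq => hne q (by simp [hq])) hbest

-- the direct dict lookup equals A's direct scan
theorem direct_get_eq (ac : List String) (l : String) :
    (bDirectIndex (ac.map (fun c => (c, PySem.Str.lower c)))).get? l
      = ac.find? (fun c => l == PySem.Str.lower c) := by
  rw [bDirectIndex, direct_fold_get, PySem.Dict.get?_empty, Option.none_or, List.find?_map]
  have hp : ((fun p : String × String => p.2 == l) ∘ (fun c => (c, PySem.Str.lower c)))
      = (fun c => l == PySem.Str.lower c) := by
    funext c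
    by_cases h : PySem.Str.lower c = l
    · simp [h]
    · simp [h, Ne.symm h]
  rw [hp, Option.map_map]
  cases ac.find? (fun c => l == PySem.Str.lower c) <;> rfl

theorem step_eq (ac : List String) (m : PySem.Dict String String) (dd_col : String) :
    aStep ac m dd_col
      = bStep (bDirectIndex (ac.map (fun c => (c, PySem.Str.lower c))))
              (bSemIndex (ac.map (fun c => (c, PySem.Str.lower c)))) m dd_col := by
  rw [aStep, bStep]
  by_cases hm : m.contains dd_col
  · simp [hm]
  · simp only [hm, if_false, Bool.false_eq_true]
    rw [direct_get_eq]
    set best0 := ac.find? (fun c => PySem.Str.lower dd_col == PySem.Str.lower c) with hb0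
    by_cases ht : pvTruthy best0
    · simp [ht]
    · rw [Bool.not_eq_true] at ht
      simp only [ht, if_false, Bool.false_eq_true]
      rw [semLoop_eq ac _ (PySem.Str.lower dd_col) pvSemanticPatterns best0 ?hget ?hne ht]
      case hget =>
        intro sp hsp
        exact semIndex_get _ pvSemanticPatterns (by decide) PySem.Dict.empty
          (fun k _ => PySem.Dict.get?_empty k) sp.1 sp.2 hsp
      case hne =>
        intro sp hsp
        fin_cases hsp <;> decide
  
theorem overrides_eq (dd ac : List String) :
    aOverrides dd ac = bOverrides dd (ac.map (fun c => (c, PySem.Str.lower c))) := by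
  rw [aOverrides, bOverrides]
  have : (fun (m : PySem.Dict String String) (p : String × String) =>
      if PySem.Set.contains (PySem.Set.ofList ((ac.map (fun c => (c, PySem.Str.lower c))).map (·.2))) p.1
          && PySem.Set.contains (PySem.Set.ofList dd) p.2 then m.insert p.2 p.1 else m)
    = (fun (m : PySem.Dict String String) (p : String × String) =>
      if (ac.map PySem.Str.lower).contains p.1 && dd.contains p.2 then m.insert p.2 p.1 else m) := by
    funext m p
    rw [set_contains_ofList, set_contains_ofList, List.map_map]
    rfl
  rw [this]

theorem main_eq (dd ac : List String) :
    semantic_field_analyzer dd ac = semantic_field_analyzer_alt dd ac := by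
  rw [semantic_field_analyzer, semantic_field_analyzer_alt]
  rw [overrides_eq]
  have : aStep ac = bStep (bDirectIndex (ac.map (fun c => (c, PySem.Str.lower c))))
      (bSemIndex (ac.map (fun c => (c, PySem.Str.lower c)))) := by
    funext m c
    exact step_eq ac m c
  rw [this]

-- ===== VERDICT (by name: the statement is the Claim_ definition above) =====
theorem semantic_field_analyzer_spec : Claim_equal_semantic_field_analyzer := by
  intro dd ac _
  unfold Spec_semantic_field_analyzer
  exact main_eq dd ac
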